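-- pv_equiv track=rewrite | github.com/inaciovasquez2020/cyclone-terminal-obstruction | scripts/algebra/cycle_overlap_rank.py | spanning_forest
-- ===== SOURCE A (Python) =====
-- def edge_key(u, v):
--     return (u, v) if u <= v else (v, u)
--
-- def connected_components(G):
--     seen = set()
--     comps = []
--     for v in G:
--         if v in seen:
--             continue
--         comp = []
--         q = [v]
--         seen.add(v)
--         for x in q:
--             comp.append(x)
--             for y in G[x]:
--                 if y not in seen:
--                     seen.add(y)
--                     q.append(y)
--         comps.append(comp)
--     return comps
--
-- def spanning_forest(G):
--     parent = {}
--     tree_edges = set()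
--     for comp in connected_components(G):
--         root = comp[0]
--         parent[root] = None
--         q = [root]
--         for x in q:
--             for y in G[x]:
--                 if y not in parent:
--                     parent[y] = x
--                     tree_edges.add(edge_key(x, y))
--                     q.append(y)
--     return parent, tree_edges
-- ===== SOURCE B (Python) =====
-- def edge_key(u, v):
--     return (u, v) if u <= v else (v, u)
--
-- def spanning_forest(G):
--     # single fused pass: the parent dict doubles as the visited set,
--     # so no separate connected_components pass is needed
--     parent = {}
--     tree_edges = set()
--     for v in G:
--         if v in parent:
--             continue
--         parent[v] = None
--         q = [v]
--         i = 0
--         while i < len(q):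
--             x = q[i]
--             i += 1
--             for y in G[x]:
--                 if y not in parent:
--                     parent[y] = x
--                     tree_edges.add(edge_key(x, y))
--                     q.append(y)
--     return parent, tree_edges
-- ===== Notes on version B (the rewrite author's own statement) =====
-- stated objective: simpler
-- what changed: Drops the separate connected_components pass entirely: one fused loop over the keys runs a single BFS per new root, using the parent dict itself as the visited set, so the graph is traversed once instead of twice.
import Mathlib
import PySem

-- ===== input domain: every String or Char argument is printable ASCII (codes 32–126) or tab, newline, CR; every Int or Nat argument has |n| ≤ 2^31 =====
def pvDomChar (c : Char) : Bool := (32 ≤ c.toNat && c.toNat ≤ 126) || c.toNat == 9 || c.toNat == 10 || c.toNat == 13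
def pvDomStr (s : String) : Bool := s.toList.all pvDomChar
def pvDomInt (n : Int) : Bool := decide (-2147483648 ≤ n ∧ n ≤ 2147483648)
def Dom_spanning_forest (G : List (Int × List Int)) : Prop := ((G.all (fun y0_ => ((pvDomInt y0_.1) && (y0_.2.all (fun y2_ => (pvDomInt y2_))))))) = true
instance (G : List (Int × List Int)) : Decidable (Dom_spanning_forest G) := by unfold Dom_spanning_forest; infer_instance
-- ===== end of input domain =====

-- B fuses A's two BFS passes into one loop over the keys (the parent dict is the
-- visited set); objective: simpler — one traversal instead of two.
-- Loops over a queue growing while iterated are encoded with a fuel argument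
-- (pvFuel, always sufficient: pops ≤ 1 + total number of nodes mentioned in G).

-- ===== PORT A =====
def edge_key (u v : Int) : Int × Int := if u ≤ v then (u, v) else (v, u)

-- fuel bound for one BFS run: 1 + #keys + total adjacency length
def pvFuel (d : PySem.Dict Int (List Int)) : Nat :=
  d.size + (d.items.map (fun p => p.2.length)).sum + 1

-- inner 'for y in G[x]' of connected_components: state (seen, q)
def ccVisit (seen : PySem.Set Int) (q : List Int) (y : Int) : PySem.Set Int × List Int :=
  if PySem.Set.contains seen y then (seen, q) else (PySem.Set.add seen y, q ++ [y])

-- 'for x in q' of connected_components (q grows while iterated): state (seen, comp)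
def ccBfs (d : PySem.Dict Int (List Int)) : Nat → PySem.Set Int → List Int → List Int → PySem.Set Int × List Int
  | 0, seen, comp, _ => (seen, comp)
  | _ + 1, seen, comp, [] => (seen, comp)
  | fuel + 1, seen, comp, x :: q =>
      let s := (d.getD x []).foldl (fun acc y => ccVisit acc.1 acc.2 y) (seen, q)
      ccBfs d fuel s.1 (comp ++ [x]) s.2

def ccStep (d : PySem.Dict Int (List Int)) (st : PySem.Set Int × List (List Int)) (v : Int) :
    PySem.Set Int × List (List Int) :=
  if PySem.Set.contains st.1 v then st
  else
    let r := ccBfs d (pvFuel d) (PySem.Set.add st.1 v) [] [v]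
    (r.1, st.2 ++ [r.2])

def connected_components (d : PySem.Dict Int (List Int)) : List (List Int) :=
  (d.keys.foldl (ccStep d) (PySem.Set.empty, [])).2

-- inner 'for y in G[x]' of spanning_forest: state (parent, tree_edges, q)
def sfVisit (x : Int) (acc : PySem.Dict Int (Option Int) × PySem.Set (Int × Int) × List Int) (y : Int) :
    PySem.Dict Int (Option Int) × PySem.Set (Int × Int) × List Int :=
  if acc.1.contains y then acc
  else (acc.1.insert y (some x), PySem.Set.add acc.2.1 (edge_key x y), acc.2.2 ++ [y])

-- 'for x in q' of spanning_forest
def sfBfs (d : PySem.Dict Int (List Int)) : Nat → PySem.Dict Int (Option Int) → PySem.Set (Int × Int) → List Int → PySem.Dict Int (Option Int) × PySem.Set (Int × Int)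
  | 0, p, t, _ => (p, t)
  | _ + 1, p, t, [] => (p, t)
  | fuel + 1, p, t, x :: q =>
      let s := (d.getD x []).foldl (sfVisit x) (p, t, q)
      sfBfs d fuel s.1 s.2.1 s.2.2

def sfStep (d : PySem.Dict Int (List Int)) (st : PySem.Dict Int (Option Int) × PySem.Set (Int × Int)) (comp : List Int) :
    PySem.Dict Int (Option Int) × PySem.Set (Int × Int) :=
  let root := comp.headD 0    -- comp[0]; components produced by connected_components are never empty
  sfBfs d (pvFuel d) (st.1.insert root none) st.2 [root]

def spanning_forest (G : List (Int × List Int)) : (List (Int × Option Int)) × (List (Int × Int)) :=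
  let d := PySem.Dict.ofList G
  let fin := (connected_components d).foldl (sfStep d) (PySem.Dict.empty, PySem.Set.empty)
  (fin.1.items, fin.2)

-- ===== PORT B =====
-- 'for y in G[x]' of B, explicit recursion over the adjacency list
def bVisit (x : Int) : List Int → PySem.Dict Int (Option Int) → PySem.Set (Int × Int) → List Int → PySem.Dict Int (Option Int) × PySem.Set (Int × Int) × List Int
  | [], p, t, q => (p, t, q)
  | y :: ys, p, t, q =>
      if p.contains y then bVisit x ys p t q
      else bVisit x ys (p.insert y (some x)) (PySem.Set.add t (edge_key x y)) (q ++ [y])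

-- B's 'while i < len(q)' queue loop
def bBfs (d : PySem.Dict Int (List Int)) : Nat → PySem.Dict Int (Option Int) → PySem.Set (Int × Int) → List Int → PySem.Dict Int (Option Int) × PySem.Set (Int × Int)
  | 0, p, t, _ => (p, t)
  | _ + 1, p, t, [] => (p, t)
  | fuel + 1, p, t, x :: q =>
      let s := bVisit x (d.getD x []) p t q
      bBfs d fuel s.1 s.2.1 s.2.2

def spanning_forest_alt (G : List (Int × List Int)) : (List (Int × Option Int)) × (List (Int × Int)) :=
  let d := PySem.Dict.ofList G
  let fin := d.keys.foldl
    (fun st v =>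
      if st.1.contains v then st
      else bBfs d (pvFuel d) (st.1.insert v none) st.2 [v])
    (PySem.Dict.empty, PySem.Set.empty)
  (fin.1.items, fin.2)

-- ===== PRECONDITION & SPEC =====
-- Pre_ excludes exactly the inputs where A raises KeyError: some adjacency list
-- of the dict mentions a vertex that is not a key (B raises the same KeyError there).
def Pre_spanning_forest (G : List (Int × List Int)) : Prop :=
  ∀ p ∈ (PySem.Dict.ofList G).items, ∀ y ∈ p.2, (PySem.Dict.ofList G).contains y = true
instance (G : List (Int × List Int)) : Decidable (Pre_spanning_forest G) := by
  unfold Pre_spanning_forest; infer_instance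

def pvWitness_spanning_forest : (List (Int × List Int)) :=
  [(0, [1, 2]), (1, [0]), (2, [0]), (5, [])]

def Spec_spanning_forest (G : List (Int × List Int)) (out : (List (Int × Option Int)) × (List (Int × Int))) : Prop := out = spanning_forest_alt G
instance (G : List (Int × List Int)) (out : (List (Int × Option Int)) × (List (Int × Int))) : Decidable (Spec_spanning_forest G out) := by unfold Spec_spanning_forest; infer_instance

-- ===== CLAIM (what is proved, stated in full; the proofs are below) =====
def Claim_equal_spanning_forest : Prop := ∀ (G : List (Int × List Int)), Dom_spanning_forest G → Pre_spanning_forest G → Spec_spanning_forest G (spanning_forest G)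

-- ===== LEMMAS AND PROOFS =====

-- B's neighbour recursion is A's neighbour fold
theorem bVisit_eq_foldl (x : Int) (ys : List Int) (p : PySem.Dict Int (Option Int))
    (t : PySem.Set (Int × Int)) (q : List Int) :
    bVisit x ys p t q = ys.foldl (sfVisit x) (p, t, q) := by
  induction ys generalizing p t q with
  | nil => rfl
  | cons y ys ih =>
      simp only [bVisit, sfVisit, List.foldl_cons]
      split_ifs <;> simp [ih]

-- B's BFS is A's spanning BFS
theorem bBfs_eq_sfBfs (d : PySem.Dict Int (List Int)) (fuel : Nat)
    (p : PySem.Dict Int (Option Int)) (t : PySem.Set (Int × Int)) (q : List Int) :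
    bBfs d fuel p t q = sfBfs d fuel p t q := by
  induction fuel generalizing p t q with
  | zero => rfl
  | succ fuel ih =>
      cases q with
      | nil => rfl
      | cons x q => simp only [bBfs, sfBfs, bVisit_eq_foldl]; exact ih _ _ _

-- the sync invariant between A's 'seen' set and the parent dict
def InSync (seen : PySem.Set Int) (p : PySem.Dict Int (Option Int)) : Prop :=
  ∀ z, PySem.Set.contains seen z = p.contains z

theorem insync_add_insert {seen : PySem.Set Int} {p : PySem.Dict Int (Option Int)}
    (h : InSync seen p) (v : Int) (w : Option Int) :
    InSync (PySem.Set.add seen v) (p.insert v w) := by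
  intro z
  rw [PySem.Dict.contains_insert]
  by_cases hz : z = v
  · subst hz; simp [PySem.Set.contains, PySem.Set.mem_add]
  · have hb : (z == v) = false := by simp [hz]
    rw [hb]
    simp only [Bool.false_or, ← h z]
    simp [PySem.Set.contains, PySem.Set.mem_add, hz]

-- one neighbour pass keeps the queues equal and the visited sets in sync
theorem visit_sync (x : Int) (ys : List Int) :
    ∀ (seen : PySem.Set Int) (q : List Int) (p : PySem.Dict Int (Option Int)) (t : PySem.Set (Int × Int)),
    InSync seen p →
    (ys.foldl (fun acc y => ccVisit acc.1 acc.2 y) (seen, q)).2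
      = (ys.foldl (sfVisit x) (p, t, q)).2.2
    ∧ InSync (ys.foldl (fun acc y => ccVisit acc.1 acc.2 y) (seen, q)).1
        (ys.foldl (sfVisit x) (p, t, q)).1 := by
  induction ys with
  | nil => intro seen q p t h; exact ⟨rfl, h⟩
  | cons y ys ih =>
      intro seen q p t h
      simp only [List.foldl_cons, ccVisit, sfVisit, h y]
      by_cases hy : p.contains y = true
      · simp only [hy, if_true]; exact ih seen q p t h
      · simp only [hy]
        exact ih _ _ _ _ (insync_add_insert h y (some x))

-- the two BFS runs keep the visited sets in sync
theorem bfs_sync (d : PySem.Dict Int (List Int)) (fuel : Nat) :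
    ∀ (q : List Int) (seen : PySem.Set Int) (comp : List Int)
      (p : PySem.Dict Int (Option Int)) (t : PySem.Set (Int × Int)),
    InSync seen p → InSync (ccBfs d fuel seen comp q).1 (sfBfs d fuel p t q).1 := by
  induction fuel with
  | zero => intro q seen comp p t h; exact h
  | succ fuel ih =>
      intro q seen comp p t h
      cases q with
      | nil => exact h
      | cons x q =>
          simp only [ccBfs, sfBfs]
          obtain ⟨hq, hs⟩ := visit_sync x (d.getD x []) seen q p t h
          rw [hq]
          exact ih _ _ _ _ _ hs

-- ccBfs accumulates comp on the left
theorem ccBfs_acc (d : PySem.Dict Int (List Int)) (fuel : Nat) :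
    ∀ (seen : PySem.Set Int) (comp : List Int) (q : List Int),
    ccBfs d fuel seen comp q = ((ccBfs d fuel seen [] q).1, comp ++ (ccBfs d fuel seen [] q).2) := by
  induction fuel with
  | zero => intro seen comp q; simp [ccBfs]
  | succ fuel ih =>
      intro seen comp q
      cases q with
      | nil => simp [ccBfs]
      | cons x q =>
          simp only [ccBfs]
          rw [ih _ (comp ++ [x]), ih _ ([] ++ [x])]
          simp

-- the comps accumulator of the outer fold is a left accumulator too
theorem ccFold_acc (d : PySem.Dict Int (List Int)) (ks : List Int) :
    ∀ (seen : PySem.Set Int) (cs : List (List Int)),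
    ks.foldl (ccStep d) (seen, cs)
      = ((ks.foldl (ccStep d) (seen, [])).1, cs ++ (ks.foldl (ccStep d) (seen, [])).2) := by
  induction ks with
  | nil => intro seen cs; simp
  | cons v ks ih =>
      intro seen cs
      simp only [List.foldl_cons, ccStep]
      by_cases hv : PySem.Set.contains seen v = true
      · simp only [hv, if_true]; exact ih seen cs
      · simp only [Bool.not_eq_true] at hv
        simp only [hv, Bool.false_eq_true, if_false]
        rw [ih _ (cs ++ _), ih _ ([] ++ _)]
        simp

-- fuel is of the form _+1, so the first popped vertex heads the component
theorem ccBfs_head (d : PySem.Dict Int (List Int)) (fuel : Nat) (seen : PySem.Set Int) (v : Int) :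
    (ccBfs d (fuel + 1) seen [] [v]).2.headD 0 = v := by
  simp only [ccBfs]
  rw [ccBfs_acc d fuel _ ([] ++ [v])]
  simp

-- main induction: the fused loop equals phase 2 folded over the new components
theorem outer_sync (d : PySem.Dict Int (List Int)) (ks : List Int) :
    ∀ (seen : PySem.Set Int) (st : PySem.Dict Int (Option Int) × PySem.Set (Int × Int)),
    InSync seen st.1 →
    ks.foldl (fun st v => if st.1.contains v then st
                          else bBfs d (pvFuel d) (st.1.insert v none) st.2 [v]) st
      = ((ks.foldl (ccStep d) (seen, [])).2).foldl (sfStep d) st := by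
  induction ks with
  | nil => intro seen st h; rfl
  | cons v ks ih =>
      intro seen st h
      simp only [List.foldl_cons, ccStep]
      by_cases hv : PySem.Set.contains seen v = true
      · have hv' : st.1.contains v = true := by rw [← h v]; exact hv
        simp only [hv, hv', if_true]
        exact ih seen st h
      · simp only [Bool.not_eq_true] at hv
        have hv' : st.1.contains v = false := by rw [← h v]; exact hv
        simp only [hv, hv', Bool.false_eq_true, if_false]
        rw [ccFold_acc]
        simp only [List.foldl_append, List.foldl_cons, List.foldl_nil]
        have hstep : sfStep d st (ccBfs d (pvFuel d) (PySem.Set.add seen v) [] [v]).2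
            = bBfs d (pvFuel d) (st.1.insert v none) st.2 [v] := by
          unfold sfStep
          rw [bBfs_eq_sfBfs]
          have : pvFuel d = (d.size + (d.items.map (fun p => p.2.length)).sum) + 1 := rfl
          rw [this, ccBfs_head]
        rw [hstep]
        exact ih _ _ (by
          have := bfs_sync d (pvFuel d) [v] (PySem.Set.add seen v) []
            (st.1.insert v none) st.2 (insync_add_insert h v none)
          rw [bBfs_eq_sfBfs]
          exact this)

theorem insync_empty : InSync PySem.Set.empty PySem.Dict.empty := by
  intro z; simp [PySem.Set.contains, PySem.Set.empty, PySem.Dict.contains_empty]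

-- ===== VERDICT (by name: the statement is the Claim_ definition above) =====
theorem spanning_forest_spec : Claim_equal_spanning_forest := by
  intro G _ _
  unfold Spec_spanning_forest
  simp only [spanning_forest, spanning_forest_alt, connected_components]
  rw [outer_sync _ _ PySem.Set.empty _ insync_empty]
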